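-- pv_equiv track=rewrite | github.com/tarunyadav0204/Astrology | backend/calculators/jaimini_full_analyzer.py | _get_rashi_drishti
-- ===== SOURCE A (Python) =====
-- from typing import Dict, Any, List
--
-- def _get_rashi_drishti(sign: int) -> List[int]:
--     # Signs are 0-indexed (Aries=0)
--     # Groups:
--     # Moveable (Chara): 0, 3, 6, 9 (Aries, Cancer, Libra, Cap)
--     # Fixed (Sthira): 1, 4, 7, 10 (Taurus, Leo, Scorpio, Aqu)
--     # Dual (Dviswabhava): 2, 5, 8, 11 (Gemini, Virgo, Sag, Pis)
--
--     aspects = []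
--
--     # Moveable aspects Fixed (except adjacent)
--     if sign in [0, 3, 6, 9]:
--         # Aries(0) -> Leo(4), Scorp(7), Aqu(10). (Skip Tau(1))
--         # Cancer(3) -> Scorp(7), Aqu(10), Tau(1). (Skip Leo(4))
--         fixed = [1, 4, 7, 10]
--         for f in fixed:
--             if f != (sign + 1) % 12: # Check forward adjacent (e.g Aries->Taurus)
--                  aspects.append(f)
--
--     # Fixed aspects Moveable (except adjacent)
--     elif sign in [1, 4, 7, 10]:
--         # Taurus(1) -> Cancer(3), Lib(6), Cap(9). (Skip Aries(0))
--         moveable = [0, 3, 6, 9]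
--         for m in moveable:
--             if m != (sign - 1 + 12) % 12: # Check backward adjacent (e.g Taurus->Aries)
--                 aspects.append(m)
--
--     # Dual aspects other Duals
--     elif sign in [2, 5, 8, 11]:
--         dual = [2, 5, 8, 11]
--         for d in dual:
--             if d != sign:
--                 aspects.append(d)
--
--     return aspects
-- ===== SOURCE B (Python) =====
-- # Precomputed aspect table: one dict lookup instead of group tests + filtered loop.
-- DRISHTI = {
--     0: [4, 7, 10], 3: [1, 7, 10], 6: [1, 4, 10], 9: [1, 4, 7],
--     1: [3, 6, 9], 4: [0, 6, 9], 7: [0, 3, 9], 10: [0, 3, 6],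
--     2: [5, 8, 11], 5: [2, 8, 11], 8: [2, 5, 11], 11: [2, 5, 8],
-- }
--
-- def _get_rashi_drishti(sign: int):
--     return list(DRISHTI.get(sign, []))
-- ===== Notes on version B (the rewrite author's own statement) =====
-- stated objective: simpler
-- what changed: Replaces the group-membership branches and filtered append loops with a precomputed sign->aspects table and a single dict lookup (copied on return).
import Mathlib
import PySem

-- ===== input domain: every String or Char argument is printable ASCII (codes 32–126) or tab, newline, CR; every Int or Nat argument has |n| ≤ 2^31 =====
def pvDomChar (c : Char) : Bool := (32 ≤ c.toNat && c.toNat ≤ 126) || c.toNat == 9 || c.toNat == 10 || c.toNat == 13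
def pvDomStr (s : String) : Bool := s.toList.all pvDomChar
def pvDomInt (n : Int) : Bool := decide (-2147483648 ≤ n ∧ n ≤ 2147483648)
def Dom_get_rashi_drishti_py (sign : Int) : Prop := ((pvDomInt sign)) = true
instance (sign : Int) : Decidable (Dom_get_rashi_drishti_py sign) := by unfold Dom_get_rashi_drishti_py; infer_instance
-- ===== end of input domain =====

-- ===== PORT A =====
-- One honest line: B replaces A's group tests and filtered loops with a precomputed lookup table (simpler).
def get_rashi_drishti_py (sign : Int) : List Int :=
  if sign ∈ ([0, 3, 6, 9] : List Int) then
    [1, 4, 7, 10].foldl (fun aspects f =>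
      if f ≠ PySem.Int.mod (sign + 1) 12 then aspects ++ [f] else aspects) []
  else if sign ∈ ([1, 4, 7, 10] : List Int) then
    [0, 3, 6, 9].foldl (fun aspects m =>
      if m ≠ PySem.Int.mod (sign - 1 + 12) 12 then aspects ++ [m] else aspects) []
  else if sign ∈ ([2, 5, 8, 11] : List Int) then
    [2, 5, 8, 11].foldl (fun aspects d =>
      if d ≠ sign then aspects ++ [d] else aspects) []
  else []

-- ===== PORT B =====
def pvDRISHTI : PySem.Dict Int (List Int) :=
  PySem.Dict.ofList
  [(0, [4, 7, 10]), (3, [1, 7, 10]), (6, [1, 4, 10]), (9, [1, 4, 7]),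
   (1, [3, 6, 9]), (4, [0, 6, 9]), (7, [0, 3, 9]), (10, [0, 3, 6]),
   (2, [5, 8, 11]), (5, [2, 8, 11]), (8, [2, 5, 11]), (11, [2, 5, 8])]

def get_rashi_drishti_py_alt (sign : Int) : List Int :=
  PySem.Dict.getD pvDRISHTI sign []

-- ===== PRECONDITION & SPEC =====
def Spec_get_rashi_drishti_py (sign : Int) (out : List Int) : Prop := out = get_rashi_drishti_py_alt sign
instance (sign : Int) (out : List Int) : Decidable (Spec_get_rashi_drishti_py sign out) := by unfold Spec_get_rashi_drishti_py; infer_instance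

-- ===== CLAIM =====
def Claim_equal_get_rashi_drishti_py : Prop := ∀ (sign : Int), Dom_get_rashi_drishti_py sign → Spec_get_rashi_drishti_py sign (get_rashi_drishti_py sign)

-- ===== LEMMAS AND PROOFS =====

-- ===== VERDICT =====
theorem get_rashi_drishti_py_spec : Claim_equal_get_rashi_drishti_py := by
  intro sign _
  unfold Spec_get_rashi_drishti_py get_rashi_drishti_py get_rashi_drishti_py_alt
  by_cases h1 : sign ∈ ([0, 3, 6, 9] : List Int)
  · simp only [List.mem_cons, List.not_mem_nil, or_false] at h1
    rcases h1 with rfl | rfl | rfl | rfl <;> decide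
  · by_cases h2 : sign ∈ ([1, 4, 7, 10] : List Int)
    · simp only [List.mem_cons, List.not_mem_nil, or_false] at h2
      rcases h2 with rfl | rfl | rfl | rfl <;> decide
    · by_cases h3 : sign ∈ ([2, 5, 8, 11] : List Int)
      · simp only [List.mem_cons, List.not_mem_nil, or_false] at h3
        rcases h3 with rfl | rfl | rfl | rfl <;> decide
      · simp only [List.mem_cons, List.not_mem_nil, or_false, not_or] at h1 h2 h3
        obtain ⟨a0, a3, a6, a9⟩ := h1
        obtain ⟨a1, a4, a7, a10⟩ := h2
        obtain ⟨a2, a5, a8, a11⟩ := h3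
        have hkeys : pvDRISHTI.keys =
            [(0:Int), 3, 6, 9, 1, 4, 7, 10, 2, 5, 8, 11] := by decide
        have hnone : pvDRISHTI.get? sign = none := by
          rw [PySem.Dict.get?_eq_none_iff_not_mem_keys, hkeys]
          simp [a0, a3, a6, a9, a1, a4, a7, a10, a2, a5, a8, a11]
        simp [PySem.Dict.getD, hnone, a0, a3, a6, a9, a1, a4, a7, a10, a2, a5, a8, a11]
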